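-- pv_equiv track=rewrite | github.com/alelouis/haar-wavelets | haar_dwt_idwt.py | idwt
-- ===== SOURCE A (Python) =====
-- def idwt(approx, details):
--     # Haar Inverse Discrete Wavelet Transform, depth passes
--     N = len(approx + details)
--     sums = [sum([[k] * (N // len(approx)) for k in approx], [])]
--     bs, i = N//2, 0
--     while bs > 0 and i<len(details):
--         values = sum([sum([[-a]*(N//(2*bs)), [a]*(N//(2*bs))], []) for a in details[::-1][i:i+bs]], [])
--         sums.append(values[::-1])
--         i += bs
--         bs //= 2
--     rec_data = [sum([s[j] for s in sums]) for j in range(N)]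
--     return rec_data
-- ===== SOURCE B (Python) =====
-- def idwt(approx, details):
--     # standard pyramidal Haar synthesis: grow the signal one level at a time,
--     # consuming the detail coefficients coarsest-first
--     current = list(approx)
--     idx = 0
--     while idx < len(details):
--         if not current:
--             # no coefficients to refine yet details remain: malformed call
--             raise IndexError("list index out of range")
--         level = [details[idx + i] for i in range(len(current))]
--         current = [x for c, d in zip(current, level) for x in (c + d, c - d)]
--         idx += len(level)
--     return current
-- ===== Notes on version B (the rewrite author's own statement) =====
-- stated objective: faster
-- what changed: Replaces A's construction of one N-long block-constant accumulator vector per level plus a final pointwise summation over all levels by the standard pyramidal Haar synthesis that doubles a single growing list per level.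
-- outside the precondition, e.g. on idwt([1], [1, 2, 3, 4, 5]): A returns [6, 0, 7, -5, 4, -6], B raises IndexError; on idwt([2, 4], [1, 1, 2, 2]): A returns [4, 2, 5, 1, 5, 1], B raises IndexError
import Mathlib
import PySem

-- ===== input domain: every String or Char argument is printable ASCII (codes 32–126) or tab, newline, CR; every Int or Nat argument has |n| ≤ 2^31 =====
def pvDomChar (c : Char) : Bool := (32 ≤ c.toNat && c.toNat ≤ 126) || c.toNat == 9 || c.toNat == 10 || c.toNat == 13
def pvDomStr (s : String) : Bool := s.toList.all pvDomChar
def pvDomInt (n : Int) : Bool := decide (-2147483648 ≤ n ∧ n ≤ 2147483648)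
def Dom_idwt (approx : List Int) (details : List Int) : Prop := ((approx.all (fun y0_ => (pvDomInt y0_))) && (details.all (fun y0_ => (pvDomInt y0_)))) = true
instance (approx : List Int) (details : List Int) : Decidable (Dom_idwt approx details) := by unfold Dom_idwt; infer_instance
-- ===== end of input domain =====

-- B replaces A's per-level N-long block-constant accumulator vectors (summed pointwise at
-- the end) by the standard pyramidal Haar synthesis doubling one growing list per level.

-- ===== PORT A =====
-- the while loop, returning the list of rows appended to `sums` (in append order);
-- m = N//(2*bs) is inlined, details[::-1][i:i+bs] is PySem.List.slice on the reversed list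
def idwtRows (N : Nat) (details : List Int) (bs i : Nat) : List (List Int) :=
  if h : 0 < bs ∧ i < details.length then
    ((PySem.List.slice details.reverse (some (i : Int)) (some ((i : Int) + (bs : Int)))).flatMap
        (fun a => List.replicate (N / (2 * bs)) (-a) ++ List.replicate (N / (2 * bs)) a)).reverse
      :: idwtRows N details (bs / 2) (i + bs)
  else []
termination_by bs
decreasing_by omega

def idwt (approx : List Int) (details : List Int) : List Int :=
  -- N = len(approx + details); sums = [expansion of approx] ++ rows of the while loop;
  -- s[j] is in range on every input admitted by Pre_idwt (pyGetD is its total form)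
  (List.range (approx ++ details).length).map
    (fun (j : Nat) =>
      ((approx.flatMap (fun a => List.replicate ((approx ++ details).length / approx.length) a)
          :: idwtRows (approx ++ details).length details ((approx ++ details).length / 2) 0).map
        (fun s => PySem.List.pyGetD s (j : Int) 0)).sum)

-- ===== PORT B =====
def idwtAltLoop (details : List Int) (current : List Int) (idx : Nat) : List Int :=
  if h : idx < details.length then
    if hc : current = [] then
      current  -- here the Python raises IndexError: excluded by Pre_idwt (dead under Pre_)
    else
      -- level = [details[idx + i] for i in range(len(current))]; in range under Pre_idwt
      let level := (List.range current.length).map (fun (i : Nat) => PySem.List.pyGetD details ((idx : Int) + (i : Int)) 0)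
      idwtAltLoop details ((current.zip level).flatMap (fun p => [p.1 + p.2, p.1 - p.2])) (idx + level.length)
  else current
termination_by details.length - idx
decreasing_by
  have h1 : idx < details.length := h
  have h3 := List.length_pos_of_ne_nil hc
  simp only [List.length_map, List.length_range]
  omega

def idwt_alt (approx : List Int) (details : List Int) : List Int :=
  idwtAltLoop details approx 0

-- ===== PRECONDITION & SPEC =====
-- Pre_ admits exactly the valid Haar pyramid shapes: len(details) = len(approx)·(2^k − 1).
-- On other shapes A either raises IndexError or (for a few length combinations) returns an
-- accidental pointwise sum of rows of mismatched lengths — a value of no Haar meaning that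
-- neither implementation specifies — while B raises IndexError.
def Pre_idwt (approx : List Int) (details : List Int) : Prop :=
  ∃ k ≤ details.length, details.length = approx.length * (2 ^ k - 1)
instance (approx : List Int) (details : List Int) : Decidable (Pre_idwt approx details) := by
  unfold Pre_idwt; infer_instance

def pvWitness_idwt : List Int × List Int := ([5, 7], [1, 2, 3, 4, 5, 6])

def Spec_idwt (approx : List Int) (details : List Int) (out : List Int) : Prop := out = idwt_alt approx details
instance (approx : List Int) (details : List Int) (out : List Int) : Decidable (Spec_idwt approx details out) := by unfold Spec_idwt; infer_instance

-- ===== CLAIM (what is proved, stated in full; the proofs are below) =====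
def Claim_equal_idwt : Prop := ∀ (approx : List Int) (details : List Int), Dom_idwt approx details → Pre_idwt approx details → Spec_idwt approx details (idwt approx details)

-- ===== LEMMAS AND PROOFS =====

-- proof-side vocabulary
def expandH (c : List Int) (m : Nat) : List Int := c.flatMap (fun a => List.replicate m a)
def rowH (m : Nat) (l : List Int) : List Int := l.flatMap (fun a => List.replicate m a ++ List.replicate m (-a))
def stepH (c l : List Int) : List Int := (c.zip l).flatMap (fun p => [p.1 + p.2, p.1 - p.2])
def levelH (la t : Nat) (details : List Int) : List Int := (details.drop (la * (2 ^ t - 1))).take (la * 2 ^ t)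
def zipAdd (x y : List Int) : List Int := List.zipWith (· + ·) x y

-- the common mathematical form: pyramidal synthesis, coarsest level first
def pyrSpec : Nat → List Int → List Int → List Int
  | 0, cur, _ => cur
  | k + 1, cur, dets => pyrSpec k (stepH cur (dets.take cur.length)) (dets.drop cur.length)

theorem length_expandH (c : List Int) (m : Nat) : (expandH c m).length = c.length * m := by
  induction c with
  | nil => simp [expandH]
  | cons a c ih => simp [expandH, Nat.succ_mul] at ih ⊢; try omega

theorem length_rowH (m : Nat) (l : List Int) : (rowH m l).length = l.length * (2 * m) := by
  induction l with
  | nil => simp [rowH]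
  | cons a l ih => simp [rowH, Nat.succ_mul, Nat.mul_add, two_mul] at ih ⊢; try omega

theorem length_stepH (c l : List Int) (h : c.length = l.length) :
    (stepH c l).length = 2 * c.length := by
  induction c generalizing l with
  | nil => simp [stepH]
  | cons a c ih =>
    cases l with
    | nil => simp at h
    | cons b l =>
      have := ih l (by simpa using h)
      simp [stepH] at this ⊢
      try omega

theorem expandH_one (c : List Int) : expandH c 1 = c := by
  induction c with
  | nil => rfl
  | cons a c ih => simp [expandH] at ih ⊢; try exact ih

-- reversed slice of the reversed list = reverse of the mirrored slice
theorem rev_drop_take (xs : List Int) (i n : Nat) (h : i + n ≤ xs.length) :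
    (xs.reverse.drop i).take n = ((xs.drop (xs.length - i - n)).take n).reverse := by
  apply List.ext_getElem
  · simp
    omega
  · intro m h1 h2
    simp only [List.length_take, List.length_drop, List.length_reverse] at h1 h2
    simp only [List.getElem_take, List.getElem_drop, List.getElem_reverse, List.length_take,
      List.length_drop]
    congr 1
    omega

theorem rev_flatMap_rev (l : List Int) (f : Int → List Int) :
    (l.reverse.flatMap f).reverse = l.flatMap (fun a => (f a).reverse) := by
  induction l with
  | nil => simp
  | cons a l ih => simp [List.flatMap_append, ih]

theorem zipWith_replicate' (f : Int → Int → Int) (n : Nat) (a b : Int) :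
    List.zipWith f (List.replicate n a) (List.replicate n b) = List.replicate n (f a b) := by
  induction n with
  | zero => simp
  | succ n ih => simp [List.replicate_succ, ih]

theorem zipAdd_zero_right (s : List Int) (N : Nat) (h : s.length = N) :
    zipAdd s (List.replicate N 0) = s := by
  induction s generalizing N with
  | nil => simp [zipAdd]
  | cons a s ih =>
    cases N with
    | zero => simp at h
    | succ N =>
      simp only [zipAdd, List.replicate_succ, List.zipWith_cons_cons, add_zero]
      rw [show List.zipWith (· + ·) s (List.replicate N 0) = zipAdd s (List.replicate N 0) from rfl,
        ih N (by simpa using h)]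

theorem zipAdd_zero_left (s : List Int) (N : Nat) (h : s.length = N) :
    zipAdd (List.replicate N 0) s = s := by
  induction s generalizing N with
  | nil => simp [zipAdd]
  | cons a s ih =>
    cases N with
    | zero => simp at h
    | succ N =>
      simp only [zipAdd, List.replicate_succ, List.zipWith_cons_cons, zero_add]
      rw [show List.zipWith (· + ·) (List.replicate N 0) s = zipAdd (List.replicate N 0) s from rfl,
        ih N (by simpa using h)]

theorem zipAdd_assoc (x y z : List Int) : zipAdd (zipAdd x y) z = zipAdd x (zipAdd y z) := by
  induction x generalizing y z with
  | nil => simp [zipAdd]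
  | cons a x ih =>
    cases y with
    | nil => simp [zipAdd]
    | cons b y =>
      cases z with
      | nil => simp [zipAdd]
      | cons c z =>
        simp only [zipAdd, List.zipWith_cons_cons] at ih ⊢
        rw [ih]
        congr 1
        ring

theorem zipAdd_comm (x y : List Int) : zipAdd x y = zipAdd y x :=
  List.zipWith_comm_of_comm (fun a b => Int.add_comm a b)

theorem zipAdd_append (x1 x2 y1 y2 : List Int) (h : x1.length = y1.length) :
    zipAdd (x1 ++ x2) (y1 ++ y2) = zipAdd x1 y1 ++ zipAdd x2 y2 :=
  List.zipWith_append h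

theorem foldr_cons_zipAdd (x : List Int) (L : List (List Int)) (b : List Int) :
    zipAdd x (L.foldr zipAdd b) = (x :: L).foldr zipAdd b := rfl

-- pointwise final summation = fold of zipAdd, given all rows have length N
theorem recDataLem (sums : List (List Int)) (N : Nat) (h : ∀ s ∈ sums, s.length = N) :
    (List.range N).map (fun (j : Nat) => (sums.map (fun s => PySem.List.pyGetD s (j : Int) 0)).sum)
      = sums.foldr zipAdd (List.replicate N 0) := by
  induction sums with
  | nil => simp [List.map_const']
  | cons s ss ih =>
    have hs : s.length = N := h s (by simp)
    have hss : ∀ t ∈ ss, t.length = N := fun t ht => h t (by simp [ht])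
    rw [List.foldr_cons, ← ih hss]
    have hlen : ((List.range N).map
        (fun (j : Nat) => (ss.map (fun s => PySem.List.pyGetD s (j : Int) 0)).sum)).length = N := by simp
    apply List.ext_getElem
    · simp [zipAdd, hs]
    · intro i h1 h2
      simp only [List.getElem_map, List.getElem_range, List.map_cons, List.sum_cons, zipAdd,
        List.getElem_zipWith]
      congr 1
      rw [PySem.List.pyGetD_natCast, List.getD_eq_getElem s 0 (by simp at h1; omega)]

theorem foldr_zipAdd_init (rs : List (List Int)) (c : List Int) :
    rs.foldr zipAdd c = zipAdd (rs.foldr zipAdd (List.replicate c.length 0)) c := by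
  induction rs with
  | nil => simp [zipAdd_zero_left c c.length rfl]
  | cons r rs ih => rw [List.foldr_cons, ih, List.foldr_cons, ← zipAdd_assoc]

-- absorbing a detail row into the expansion: one inverse butterfly
theorem addExpandRow (c l : List Int) (m : Nat) (h : c.length = l.length) :
    zipAdd (expandH c (2 * m)) (rowH m l) = expandH (stepH c l) m := by
  induction c generalizing l with
  | nil => simp [zipAdd, expandH, stepH]
  | cons a c ih =>
    cases l with
    | nil => simp at h
    | cons b l =>
      have hl : c.length = l.length := by simpa using h
      have h1 : expandH (a :: c) (2 * m)
          = (List.replicate m a ++ List.replicate m a) ++ expandH c (2 * m) := by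
        simp only [expandH, List.flatMap_cons]
        rw [two_mul, List.replicate_add]
      have h2 : rowH m (b :: l)
          = (List.replicate m b ++ List.replicate m (-b)) ++ rowH m l := by
        simp only [rowH, List.flatMap_cons]
      have h3 : expandH (stepH (a :: c) (b :: l)) m
          = (List.replicate m (a + b) ++ List.replicate m (a - b)) ++ expandH (stepH c l) m := by
        simp only [stepH, List.zip_cons_cons, List.flatMap_cons, expandH, List.flatMap_append]
        simp
      rw [h1, h2, h3, zipAdd_append _ _ _ _ (by simp), zipAdd_append _ _ _ _ (by simp), ih l hl]
      simp only [zipAdd, zipWith_replicate']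
      rw [show a + -b = a - b from by ring]

-- A's loop, characterised: from the state with j levels still to do it produces the rows
-- for levels j-1 … 0 (finest-block row first, coarsest last)
theorem rowsLem (la k : Nat) (hla : 0 < la) (details : List Int)
    (hd : details.length = la * (2 ^ k - 1)) :
    ∀ j, j ≤ k →
      idwtRows (la * 2 ^ k) details (la * 2 ^ j / 2) (la * (2 ^ k - 1) - la * (2 ^ j - 1))
        = (List.range j).reverse.map (fun t => rowH (2 ^ (k - 1 - t)) (levelH la t details)) := by
  intro j
  induction j with
  | zero =>
    intro _
    unfold idwtRows
    rw [dif_neg]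
    · simp
    · rintro ⟨-, hlt⟩
      simp only [pow_zero, Nat.sub_self, Nat.mul_zero, Nat.sub_zero] at hlt
      omega
  | succ j ih =>
    intro hjk
    have p1 : 0 < 2 ^ j := Nat.two_pow_pos j
    have p1k : 0 < 2 ^ k := Nat.two_pow_pos k
    have p2 : (2 : Nat) ^ (j + 1) = 2 * 2 ^ j := by rw [pow_succ]; ring
    have p3 : (2 : Nat) ^ (j + 1) ≤ 2 ^ k := Nat.pow_le_pow_right (by norm_num) hjk
    have e1 : la * 2 ^ (j + 1) ≤ la * 2 ^ k := Nat.mul_le_mul_left _ p3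
    have e2 : la * 2 ^ (j + 1) = 2 * (la * 2 ^ j) := by rw [p2]; ring
    have e3 : la * (2 ^ (j + 1) - 1) = 2 * (la * 2 ^ j) - la := by
      rw [Nat.mul_sub, mul_one, e2]
    have e4 : la * (2 ^ k - 1) = la * 2 ^ k - la := by rw [Nat.mul_sub, mul_one]
    have e5 : la * (2 ^ j - 1) = la * 2 ^ j - la := by rw [Nat.mul_sub, mul_one]
    have e6 : la ≤ la * 2 ^ j := Nat.le_mul_of_pos_right _ p1
    rw [e2] at e1
    have hbs : la * 2 ^ (j + 1) / 2 = la * 2 ^ j := by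
      rw [e2]; exact Nat.mul_div_cancel_left _ (by norm_num)
    rw [hbs]
    have hcond : 0 < la * 2 ^ j ∧
        la * (2 ^ k - 1) - la * (2 ^ (j + 1) - 1) < details.length := by
      refine ⟨Nat.mul_pos hla p1, ?_⟩
      rw [hd, e3, e4]
      omega
    unfold idwtRows
    rw [dif_pos hcond]
    have hm : la * 2 ^ k / (2 * (la * 2 ^ j)) = 2 ^ (k - 1 - j) := by
      have hexp : (j + 1) + (k - 1 - j) = k := by omega
      have : (2 * (la * 2 ^ j)) * 2 ^ (k - 1 - j) = la * 2 ^ k := by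
        calc 2 * (la * 2 ^ j) * 2 ^ (k - 1 - j) = la * (2 ^ (j + 1) * 2 ^ (k - 1 - j)) := by
              rw [p2]; ring
          _ = la * 2 ^ k := by rw [← pow_add, hexp]
      rw [← this, Nat.mul_div_cancel_left _ (by positivity)]
    rw [hm]
    have hslice : PySem.List.slice details.reverse
        (some ((la * (2 ^ k - 1) - la * (2 ^ (j + 1) - 1) : Nat) : Int))
        (some (((la * (2 ^ k - 1) - la * (2 ^ (j + 1) - 1) : Nat) : Int) + ((la * 2 ^ j : Nat) : Int)))
        = (levelH la j details).reverse := by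
      rw [PySem.List.slice_natCast_add, rev_drop_take _ _ _ (by rw [hd, e3, e4]; omega)]
      have harg : details.length - (la * (2 ^ k - 1) - la * (2 ^ (j + 1) - 1)) - la * 2 ^ j
          = la * (2 ^ j - 1) := by
        rw [hd, e3, e4, e5]
        omega
      rw [harg]
      rfl
    rw [hslice]
    have hhead : ((levelH la j details).reverse.flatMap
          (fun a => List.replicate (2 ^ (k - 1 - j)) (-a) ++ List.replicate (2 ^ (k - 1 - j)) a)).reverse
        = rowH (2 ^ (k - 1 - j)) (levelH la j details) := by
      rw [rev_flatMap_rev]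
      unfold rowH
      simp only [List.reverse_append, List.reverse_replicate]
    rw [hhead]
    have hrange : (List.range (j + 1)).reverse = j :: (List.range j).reverse := by
      rw [List.range_succ]
      simp
    rw [hrange, List.map_cons]
    have harg2 : la * (2 ^ k - 1) - la * (2 ^ (j + 1) - 1) + la * 2 ^ j
        = la * (2 ^ k - 1) - la * (2 ^ j - 1) := by
      rw [e3, e4, e5]
      omega
    rw [harg2, ih (by omega)]

theorem length_levelH (la t k : Nat) (h : t < k) (details : List Int)
    (hd : details.length = la * (2 ^ k - 1)) :
    (levelH la t details).length = la * 2 ^ t := by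
  have p2 : (2 : Nat) ^ (t + 1) = 2 * 2 ^ t := by rw [pow_succ]; ring
  have p3 : (2 : Nat) ^ (t + 1) ≤ 2 ^ k := Nat.pow_le_pow_right (by norm_num) h
  have e1 : la * 2 ^ (t + 1) ≤ la * 2 ^ k := Nat.mul_le_mul_left _ p3
  have e2 : la * 2 ^ (t + 1) = 2 * (la * 2 ^ t) := by rw [p2]; ring
  have e4 : la * (2 ^ k - 1) = la * 2 ^ k - la := by rw [Nat.mul_sub, mul_one]
  have e5 : la * (2 ^ t - 1) = la * 2 ^ t - la := by rw [Nat.mul_sub, mul_one]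
  have e6 : la ≤ la * 2 ^ t := Nat.le_mul_of_pos_right _ (Nat.two_pow_pos t)
  rw [e2] at e1
  unfold levelH
  rw [List.length_take, List.length_drop, hd, e4, e5]
  omega

-- closed form of port A on pyramid-shaped input
theorem idwtChar (approx details : List Int) (k : Nat) (ha : approx ≠ [])
    (hd : details.length = approx.length * (2 ^ k - 1)) :
    idwt approx details
      = (expandH approx (2 ^ k)
          :: (List.range k).reverse.map
               (fun t => rowH (2 ^ (k - 1 - t)) (levelH approx.length t details))).foldr
          zipAdd (List.replicate (approx.length * 2 ^ k) 0) := by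
  have hla : 0 < approx.length := List.length_pos_of_ne_nil ha
  have e4 : approx.length * (2 ^ k - 1) = approx.length * 2 ^ k - approx.length := by
    rw [Nat.mul_sub, mul_one]
  have e6 : approx.length ≤ approx.length * 2 ^ k :=
    Nat.le_mul_of_pos_right _ (Nat.two_pow_pos k)
  have hN : (approx ++ details).length = approx.length * 2 ^ k := by
    rw [List.length_append, hd, e4]
    omega
  have hdivla : approx.length * 2 ^ k / approx.length = 2 ^ k :=
    Nat.mul_div_cancel_left _ hla
  have hrows := rowsLem approx.length k hla details hd k le_rfl
  rw [Nat.sub_self] at hrows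
  unfold idwt
  rw [hN, hdivla, hrows]
  exact recDataLem _ _ (by
    intro s hs
    rcases List.mem_cons.mp hs with h1 | h2
    · subst h1
      show (expandH approx (2 ^ k)).length = _
      rw [length_expandH]
    · obtain ⟨t, ht, rfl⟩ := List.mem_map.mp h2
      have htk : t < k := by
        have := List.mem_reverse.mp ht
        simpa using List.mem_range.mp (by simpa using this)
      rw [length_rowH, length_levelH approx.length t k htk details hd]
      have hexp : t + (k - 1 - t) + 1 = k := by omega
      calc approx.length * 2 ^ t * (2 * 2 ^ (k - 1 - t))
          = approx.length * (2 ^ t * 2 ^ (k - 1 - t) * 2) := by ring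
        _ = approx.length * 2 ^ k := by rw [← pow_add, ← pow_succ, hexp])

theorem mainLem : ∀ (k : Nat) (approx details : List Int), approx ≠ [] →
    details.length = approx.length * (2 ^ k - 1) →
    idwt approx details = pyrSpec k approx details := by
  intro k
  induction k with
  | zero =>
    intro approx details ha hd
    have : details = [] := List.length_eq_zero_iff.mp (by simpa using hd)
    subst this
    rw [idwtChar approx [] 0 ha (by simpa using hd)]
    simp only [List.range_zero, List.reverse_nil, List.map_nil, List.foldr_cons, List.foldr_nil,
      pow_zero, mul_one, expandH_one]
    rw [zipAdd_zero_right approx approx.length rfl]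
    rfl
  | succ k ih =>
    intro approx details ha hd
    have hla : 0 < approx.length := List.length_pos_of_ne_nil ha
    have p2 : (2 : Nat) ^ (k + 1) = 2 * 2 ^ k := by rw [pow_succ]; ring
    have e2 : approx.length * 2 ^ (k + 1) = 2 * (approx.length * 2 ^ k) := by rw [p2]; ring
    have e3 : approx.length * (2 ^ (k + 1) - 1) = 2 * (approx.length * 2 ^ k) - approx.length := by
      rw [Nat.mul_sub, mul_one, e2]
    have e6 : approx.length ≤ approx.length * 2 ^ k :=
      Nat.le_mul_of_pos_right _ (Nat.two_pow_pos k)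
    have hlal : approx.length ≤ details.length := by rw [hd, e3]; omega
    -- the coarsest level is the first  la  details
    have hlvl0 : levelH approx.length 0 details = details.take approx.length := by
      unfold levelH
      simp
    have htklen : (details.take approx.length).length = approx.length := by
      rw [List.length_take]
      omega
    -- the recursive instance
    set approx2 := stepH approx (details.take approx.length) with happrox2
    have hlen2 : approx2.length = 2 * approx.length := length_stepH _ _ (by omega)
    have ha2 : approx2 ≠ [] := by
      apply List.ne_nil_of_length_pos
      omega
    have hd2 : (details.drop approx.length).length = approx2.length * (2 ^ k - 1) := by
      rw [List.length_drop, hd, hlen2, e3, Nat.mul_sub, mul_one]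
      have : 2 * approx.length * 2 ^ k = 2 * (approx.length * 2 ^ k) := by ring
      rw [this]
      omega
    -- unfold both closed forms and match them
    rw [idwtChar approx details (k + 1) ha hd]
    have hsplit : (List.range (k + 1)).reverse.map
          (fun t => rowH (2 ^ (k + 1 - 1 - t)) (levelH approx.length t details))
        = ((List.range k).reverse.map
            (fun t => rowH (2 ^ (k + 1 - 1 - (t + 1))) (levelH approx.length (t + 1) details)))
          ++ [rowH (2 ^ (k + 1 - 1 - 0)) (levelH approx.length 0 details)] := by
      rw [List.range_succ_eq_map]
      simp [List.map_reverse, List.map_map, Function.comp_def]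
    rw [hsplit, List.foldr_cons, List.foldr_append, List.foldr_cons, List.foldr_nil]
    have hclen : (rowH (2 ^ (k + 1 - 1 - 0)) (levelH approx.length 0 details)).length
        = approx.length * 2 ^ (k + 1) := by
      rw [length_rowH, hlvl0, htklen]
      simp only [Nat.add_sub_cancel, Nat.sub_zero]
      rw [e2]
      ring
    rw [zipAdd_zero_right _ _ hclen, foldr_zipAdd_init, hclen]
    rw [zipAdd_comm _ (rowH (2 ^ (k + 1 - 1 - 0)) (levelH approx.length 0 details)), ← zipAdd_assoc]
    -- absorb the coarsest row into the expansion
    have habs : zipAdd (expandH approx (2 ^ (k + 1)))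
          (rowH (2 ^ (k + 1 - 1 - 0)) (levelH approx.length 0 details))
        = expandH approx2 (2 ^ k) := by
      rw [hlvl0]
      show zipAdd (expandH approx (2 ^ (k + 1))) (rowH (2 ^ k) (details.take approx.length)) = _
      rw [show (2 : Nat) ^ (k + 1) = 2 * 2 ^ k from p2]
      exact addExpandRow approx (details.take approx.length) (2 ^ k) (by omega)
    rw [habs]
    -- the remaining rows are exactly the rows of the recursive instance
    have hrs : (List.range k).reverse.map
          (fun t => rowH (2 ^ (k + 1 - 1 - (t + 1))) (levelH approx.length (t + 1) details))
        = (List.range k).reverse.map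
          (fun t => rowH (2 ^ (k - 1 - t)) (levelH approx2.length t (details.drop approx.length))) := by
      apply List.map_congr_left
      intro t _
      have hexp : k + 1 - 1 - (t + 1) = k - 1 - t := by omega
      rw [hexp]
      congr 1
      unfold levelH
      rw [List.drop_drop, hlen2]
      have harg1 : approx.length * (2 ^ (t + 1) - 1)
          = 2 * approx.length * (2 ^ t - 1) + approx.length := by
        have pt : (2 : Nat) ^ (t + 1) = 2 * 2 ^ t := by rw [pow_succ]; ring
        have h1 : approx.length * (2 ^ (t + 1) - 1) = approx.length * 2 ^ (t + 1) - approx.length := by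
          rw [Nat.mul_sub, mul_one]
        have h2 : 2 * approx.length * (2 ^ t - 1) = 2 * (approx.length * 2 ^ t) - 2 * approx.length := by
          rw [Nat.mul_sub, mul_one]; ring_nf
        have h3 : approx.length * 2 ^ (t + 1) = 2 * (approx.length * 2 ^ t) := by rw [pt]; ring
        have h4 : approx.length ≤ approx.length * 2 ^ t :=
          Nat.le_mul_of_pos_right _ (Nat.two_pow_pos t)
        omega
      have harg2 : approx.length * 2 ^ (t + 1) = 2 * approx.length * 2 ^ t := by
        rw [pow_succ]; ring
      rw [harg1, harg2, Nat.add_comm]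
    rw [hrs]
    -- this is the closed form of the recursive instance
    have hzlen : approx.length * 2 ^ (k + 1) = approx2.length * 2 ^ k := by
      rw [hlen2, e2]
      ring
    rw [hzlen, foldr_cons_zipAdd, ← idwtChar approx2 (details.drop approx.length) k ha2 hd2]
    rw [ih approx2 (details.drop approx.length) ha2 hd2]
    rfl

theorem altLem : ∀ (k : Nat) (cur pre dets : List Int), cur ≠ [] →
    dets.length = cur.length * (2 ^ k - 1) →
    idwtAltLoop (pre ++ dets) cur pre.length = pyrSpec k cur dets := by
  intro k
  induction k with
  | zero =>
    intro cur pre dets hc hd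
    have : dets = [] := List.length_eq_zero_iff.mp (by simpa using hd)
    subst this
    unfold idwtAltLoop
    rw [dif_neg (by simp)]
    rfl
  | succ k ih =>
    intro cur pre dets hc hd
    have hcpos : 0 < cur.length := List.length_pos_of_ne_nil hc
    have p2 : (2 : Nat) ^ (k + 1) = 2 * 2 ^ k := by rw [pow_succ]; ring
    have e3 : cur.length * (2 ^ (k + 1) - 1) = 2 * (cur.length * 2 ^ k) - cur.length := by
      rw [Nat.mul_sub, mul_one, p2]; ring_nf
    have e6 : cur.length ≤ cur.length * 2 ^ k :=
      Nat.le_mul_of_pos_right _ (Nat.two_pow_pos k)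
    have hlal : cur.length ≤ dets.length := by rw [hd, e3]; omega
    have htklen : (dets.take cur.length).length = cur.length := by
      rw [List.length_take]; omega
    unfold idwtAltLoop
    rw [dif_pos (by
      rw [List.length_append]
      omega)]
    rw [dif_neg hc]
    have hlev : (List.range cur.length).map
          (fun (i : Nat) => PySem.List.pyGetD (pre ++ dets) ((pre.length : Int) + (i : Int)) 0)
        = dets.take cur.length := by
      apply List.ext_getElem
      · simp
        omega
      · intro i h1 h2
        simp only [List.getElem_map, List.getElem_range, List.getElem_take]
        rw [← Nat.cast_add, PySem.List.pyGetD_natCast]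
        have hi : i < dets.length := by simp at h1; omega
        rw [List.getD_eq_getElem _ 0 (by rw [List.length_append]; omega)]
        rw [List.getElem_append_right (by omega)]
        congr 1
        omega
    simp only [hlev, List.length_map, List.length_range]
    have hstep : (cur.zip (dets.take cur.length)).flatMap (fun p => [p.1 + p.2, p.1 - p.2])
        = stepH cur (dets.take cur.length) := rfl
    rw [hstep]
    have hlen2 : (stepH cur (dets.take cur.length)).length = 2 * cur.length :=
      length_stepH _ _ (by omega)
    have hc2 : stepH cur (dets.take cur.length) ≠ [] := by
      apply List.ne_nil_of_length_pos
      omega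
    have hd2 : (dets.drop cur.length).length
        = (stepH cur (dets.take cur.length)).length * (2 ^ k - 1) := by
      rw [List.length_drop, hd, hlen2, e3, Nat.mul_sub, mul_one]
      have : 2 * cur.length * 2 ^ k = 2 * (cur.length * 2 ^ k) := by ring
      rw [this]
      omega
    have hpre' : pre.length + (dets.take cur.length).length = (pre ++ dets.take cur.length).length := by
      rw [List.length_append]
    have hsplit : pre ++ dets = (pre ++ dets.take cur.length) ++ dets.drop cur.length := by
      rw [List.append_assoc, List.take_append_drop]
    rw [hpre', hsplit]
    rw [ih (stepH cur (dets.take cur.length)) (pre ++ dets.take cur.length)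
      (dets.drop cur.length) hc2 hd2]
    rfl

-- ===== VERDICT (by name: the statement is the Claim_ definition above) =====
theorem idwt_spec : Claim_equal_idwt := by
  intro approx details _ hpre
  obtain ⟨k, _, hd⟩ := hpre
  unfold Spec_idwt
  by_cases ha : approx = []
  · subst ha
    have : details = [] := by simpa using hd
    subst this
    show idwt [] [] = idwt_alt [] []
    unfold idwt idwt_alt idwtAltLoop
    simp
  · rw [mainLem k approx details ha hd, idwt_alt]
    have := altLem k approx [] details ha hd
    simpa using this.symm
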